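-- pv_equiv track=rewrite | github.com/dovvakkin/substitution_union | main.py | get_pos_neg_from_gold
-- ===== SOURCE A (Python) =====
-- def get_pos_neg_from_gold(golds):
--     pos = dict()
--     neg = dict()
--
--     for n_i, i in enumerate(golds):
--         for n_j, j in enumerate(golds):
--             if n_i == n_j:
--                 continue
--
--             if i == j:
--                 if n_i not in pos:
--                     pos[n_i] = [n_j]
--                 else:
--                     pos[n_i].append(n_j)
--
--             if i != j:
--                 if n_i not in neg:
--                     neg[n_i] = [n_j]
--                 else:
--                     neg[n_i].append(n_j)
--
--     return pos, neg
-- ===== SOURCE B (Python) =====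
-- def get_pos_neg_from_gold(golds):
--     # group positions by gold value, then assemble per-index lists from the groups
--     groups = {}
--     for idx, g in enumerate(golds):
--         groups.setdefault(g, []).append(idx)
--     n = len(golds)
--     others = {}
--     for g, idxs in groups.items():
--         s = set(idxs)
--         others[g] = [j for j in range(n) if j not in s]
--     pos = {}
--     neg = {}
--     for i, g in enumerate(golds):
--         same = groups[g]
--         if len(same) > 1:
--             pos[i] = [j for j in same if j != i]
--         o = others[g]
--         if o:
--             neg[i] = list(o)
--     return pos, neg
-- ===== Notes on version B (the rewrite author's own statement) =====
-- stated objective: faster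
-- what changed: Replaces the nested O(n^2) pairwise scan with a single grouping pass (gold value -> positions), one complement list computed per distinct value, and an assembly pass that slices each index's group.
import Mathlib
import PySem

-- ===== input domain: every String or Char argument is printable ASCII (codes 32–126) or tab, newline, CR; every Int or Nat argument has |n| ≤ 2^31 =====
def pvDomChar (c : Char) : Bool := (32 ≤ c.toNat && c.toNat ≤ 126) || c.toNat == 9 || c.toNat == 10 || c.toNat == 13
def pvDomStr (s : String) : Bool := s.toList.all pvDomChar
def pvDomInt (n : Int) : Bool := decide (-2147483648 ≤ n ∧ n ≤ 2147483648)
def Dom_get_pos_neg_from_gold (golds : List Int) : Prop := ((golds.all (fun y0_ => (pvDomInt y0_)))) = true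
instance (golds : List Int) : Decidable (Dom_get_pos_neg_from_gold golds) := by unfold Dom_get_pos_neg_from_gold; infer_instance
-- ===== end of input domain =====

-- B groups positions by gold value once, builds one complement list per distinct value,
-- and assembles both dicts in a single pass; A's nested pairwise scan disappears.

-- ===== PORT A =====
def get_pos_neg_from_gold (golds : List Int) : (List (Int × List Int)) × (List (Int × List Int)) :=
  let e := PySem.List.enumerate golds
  let pn : PySem.Dict Int (List Int) × PySem.Dict Int (List Int) :=
    e.foldl (fun pn p =>
      e.foldl (fun (q : PySem.Dict Int (List Int) × PySem.Dict Int (List Int)) r =>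
        (-- if n_i == n_j: continue; if i == j: append/insert into pos
         (if p.1 == r.1 then q.1
          else if p.2 == r.2 then
            (if q.1.contains p.1 then q.1.insert p.1 (q.1.getD p.1 [] ++ [r.1])
             else q.1.insert p.1 [r.1])
          else q.1),
         -- if i != j: append/insert into neg
         (if p.1 == r.1 then q.2
          else if p.2 != r.2 then
            (if q.2.contains p.1 then q.2.insert p.1 (q.2.getD p.1 [] ++ [r.1])
             else q.2.insert p.1 [r.1])
          else q.2))) pn) (PySem.Dict.empty, PySem.Dict.empty)
  (pn.1.items, pn.2.items)

-- ===== PORT B =====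
def get_pos_neg_from_gold_alt (golds : List Int) : (List (Int × List Int)) × (List (Int × List Int)) :=
  -- groups.setdefault(g, []).append(idx)
  let groups : PySem.Dict Int (List Int) :=
    (PySem.List.enumerate golds).foldl (fun d p => d.modify p.2 [] (· ++ [p.1])) PySem.Dict.empty
  let n : Int := (golds.length : Int)
  -- others[g] = [j for j in range(n) if j not in set(idxs)]
  let others : PySem.Dict Int (List Int) :=
    groups.items.foldl (fun d p =>
      let s := PySem.Set.ofList p.2
      d.insert p.1 ((PySem.List.pyRange 0 n 1).filter (fun j => !(s.contains j)))) PySem.Dict.empty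
  let pn : PySem.Dict Int (List Int) × PySem.Dict Int (List Int) :=
    (PySem.List.enumerate golds).foldl (fun (q : PySem.Dict Int (List Int) × PySem.Dict Int (List Int)) p =>
      let same := groups.getD p.2 []      -- key always present: every gold value was grouped
      let o := others.getD p.2 []         -- key always present
      ((if same.length > 1 then q.1.insert p.1 (same.filter (fun j => j != p.1)) else q.1),
       (if !o.isEmpty then q.2.insert p.1 o else q.2))) (PySem.Dict.empty, PySem.Dict.empty)
  (pn.1.items, pn.2.items)

-- ===== PRECONDITION & SPEC =====
def Spec_get_pos_neg_from_gold (golds : List Int) (out : (List (Int × List Int)) × (List (Int × List Int))) : Prop := out = get_pos_neg_from_gold_alt golds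
instance (golds : List Int) (out : (List (Int × List Int)) × (List (Int × List Int))) : Decidable (Spec_get_pos_neg_from_gold golds out) := by unfold Spec_get_pos_neg_from_gold; infer_instance

-- ===== CLAIM (what is proved, stated in full; the proofs are below) =====
def Claim_equal_get_pos_neg_from_gold : Prop := ∀ (golds : List Int), Dom_get_pos_neg_from_gold golds → Spec_get_pos_neg_from_gold golds (get_pos_neg_from_gold golds)

-- ===== LEMMAS AND PROOFS =====

-- generic append-to-one-key inner step (A's inner loop body, condition abstracted)
def pvStep (cond : Int × Int → Bool) (ni : Int) (d : PySem.Dict Int (List Int)) (r : Int × Int) :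
    PySem.Dict Int (List Int) :=
  if cond r then
    (if d.contains ni then d.insert ni (d.getD ni [] ++ [r.1]) else d.insert ni [r.1])
  else d

-- canonical conditional-insert step shared by both sides after rewriting
def pvCStep (G : Int × Int → List Int) (d : PySem.Dict Int (List Int)) (p : Int × Int) :
    PySem.Dict Int (List Int) :=
  if G p = [] then d else d.insert p.1 (G p)

def pvValP (golds : List Int) (p : Int × Int) : List Int :=
  ((PySem.List.enumerate golds 0).filter (fun r => !(p.1 == r.1) && (p.2 == r.2))).map (fun x => x.1)

def pvValN (golds : List Int) (p : Int × Int) : List Int :=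
  ((PySem.List.enumerate golds 0).filter (fun r => !(p.1 == r.1) && (p.2 != r.2))).map (fun x => x.1)

def pvSame (golds : List Int) (v : Int) : List Int :=
  ((PySem.List.enumerate golds 0).filter (fun r => r.2 == v)).map (fun x => x.1)

theorem pvInnerAux (cond : Int × Int → Bool) (ni : Int) (l : List (Int × Int)) :
    ∀ (d : PySem.Dict Int (List Int)) (acc : List Int), d.contains ni = false →
    l.foldl (pvStep cond ni) (d.insert ni acc) = d.insert ni (acc ++ (l.filter cond).map (fun x => x.1)) := by
  induction l with
  | nil => intro d acc h; simp
  | cons r l ih =>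
    intro d acc h
    by_cases hc : cond r
    · simp only [List.foldl_cons, pvStep, hc, if_true, PySem.Dict.contains_insert_self,
        PySem.Dict.getD_insert_self, PySem.Dict.insert_insert_self]
      rw [ih d (acc ++ [r.1]) h]
      simp [hc]
    · simp only [List.foldl_cons, pvStep, hc, if_false, Bool.false_eq_true]
      rw [ih d acc h]
      simp [hc]

theorem pvInner (cond : Int × Int → Bool) (ni : Int) (l : List (Int × Int))
    (d : PySem.Dict Int (List Int)) (h : d.contains ni = false) :
    l.foldl (pvStep cond ni) d =
      if ((l.filter cond).map (fun x => x.1)) = [] then d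
      else d.insert ni ((l.filter cond).map (fun x => x.1)) := by
  induction l with
  | nil => simp
  | cons r l ih =>
    by_cases hc : cond r
    · simp only [List.foldl_cons, pvStep, hc, if_true, h, Bool.false_eq_true, if_false]
      rw [pvInnerAux cond ni l d [r.1] h]
      simp [hc]
    · simp only [List.foldl_cons, pvStep, hc, if_false, Bool.false_eq_true]
      rw [ih]
      simp only [List.filter_cons, hc, Bool.false_eq_true, if_false]

theorem pvNested (inner : List (Int × Int)) (cnd : (Int × Int) → (Int × Int) → Bool)
    (l : List (Int × Int)) :
    ∀ (d : PySem.Dict Int (List Int)), (∀ p ∈ l, d.contains p.1 = false) → (l.map (fun x => x.1)).Nodup →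
    l.foldl (fun d p => inner.foldl (pvStep (cnd p) p.1) d) d
      = l.foldl (pvCStep (fun p => (inner.filter (cnd p)).map (fun x => x.1))) d := by
  induction l with
  | nil => intro _ _ _; rfl
  | cons p l ih =>
    intro d hf hn
    simp only [List.map_cons, List.nodup_cons] at hn
    simp only [List.foldl_cons]
    rw [pvInner (cnd p) p.1 inner d (hf p List.mem_cons_self)]
    have hstep : (if ((inner.filter (cnd p)).map (fun x => x.1)) = [] then d
        else d.insert p.1 ((inner.filter (cnd p)).map (fun x => x.1)))
        = pvCStep (fun p => (inner.filter (cnd p)).map (fun x => x.1)) d p := rfl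
    rw [hstep]
    by_cases hG : ((inner.filter (cnd p)).map (fun x => x.1)) = []
    · simp only [pvCStep, hG, if_true]
      exact ih d (fun q hq => hf q (List.mem_cons_of_mem _ hq)) hn.2
    · simp only [pvCStep, hG, if_false]
      apply ih
      · intro q hq
        rw [PySem.Dict.contains_insert]
        have hne : q.1 ≠ p.1 := fun he => hn.1 (he ▸ List.mem_map_of_mem hq)
        simp [hne, hf q (List.mem_cons_of_mem _ hq)]
      · exact hn.2

theorem pvNodupFst (golds : List Int) : ((PySem.List.enumerate golds 0).map (fun x => x.1)).Nodup := by
  rw [PySem.List.map_fst_enumerate]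
  simp only [zero_add]
  rw [PySem.List.pyRange_zero_natCast]
  exact (List.nodup_range).map (fun a b => by omega)

theorem pvFstInj (golds : List Int) {p r : Int × Int}
    (hp : p ∈ PySem.List.enumerate golds 0) (hr : r ∈ PySem.List.enumerate golds 0)
    (h : p.1 = r.1) : p = r := by
  rw [PySem.List.mem_enumerate_iff] at hp hr
  obtain ⟨k, hk, rfl⟩ := hp
  obtain ⟨m, hm, rfl⟩ := hr
  simp only [zero_add] at h ⊢
  have : k = m := by exact_mod_cast h
  subst this; rfl

-- the grouping dict of B, named for the proofs
def pvGroups (golds : List Int) : PySem.Dict Int (List Int) :=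
  (PySem.List.enumerate golds 0).foldl (fun d p => d.modify p.2 [] (· ++ [p.1])) PySem.Dict.empty

theorem pvGroupsGetD (golds : List Int) (v : Int) :
    (pvGroups golds).getD v [] = pvSame golds v := by
  have h := PySem.Dict.getD_foldl_modify_append
    (l := (PySem.List.enumerate golds 0).map Prod.swap) (d := PySem.Dict.empty) (c := v)
  rw [List.foldl_map] at h
  simp only [Prod.fst_swap, Prod.snd_swap] at h
  unfold pvGroups
  rw [h]
  simp [List.filter_map, pvSame, Function.comp_def]

theorem pvGroupsKeys (golds : List Int) :
    (pvGroups golds).keys = PySem.Set.update ([] : List Int) golds := by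
  have h := PySem.Dict.keys_foldl_modify_key (PySem.List.enumerate golds 0)
    (fun p : Int × Int => p.2) ([] : List Int) (fun _ p l => l ++ [p.1]) PySem.Dict.empty
  rw [PySem.Dict.keys_empty, PySem.List.map_snd_enumerate] at h
  exact h

theorem pvGroupsNodup (golds : List Int) : (pvGroups golds).keys.Nodup := by
  exact PySem.Dict.nodup_keys_foldl_modify_key (PySem.List.enumerate golds 0)
    (fun p : Int × Int => p.2) ([] : List Int) (fun _ p l => l ++ [p.1]) PySem.Dict.empty
    PySem.Dict.nodup_keys_empty

theorem pvGroupsMemItems (golds : List Int) (v : Int) (hv : v ∈ golds) :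
    (v, pvSame golds v) ∈ (pvGroups golds).items := by
  rw [← PySem.Dict.get?_eq_some_iff_mem_items _ _ _ (pvGroupsNodup golds)]
  have hc : (pvGroups golds).contains v = true := by
    rw [PySem.Dict.contains_eq_decide_mem_keys, pvGroupsKeys]
    simp [PySem.Set.mem_update, hv]
  rw [PySem.Dict.contains_eq_isSome_get?] at hc
  obtain ⟨x, hx⟩ := Option.isSome_iff_exists.mp hc
  have := pvGroupsGetD golds v
  rw [PySem.Dict.getD_eq_get?_getD, hx] at this
  simp at this
  rw [hx, this]


def pvComplL (golds : List Int) (idxs : List Int) : List Int :=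
  (PySem.List.pyRange 0 ((golds.length : Int)) 1).filter
    (fun j => !((PySem.Set.ofList idxs).contains j))

def pvOthers (golds : List Int) : PySem.Dict Int (List Int) :=
  (pvGroups golds).items.foldl (fun d p =>
    let s := PySem.Set.ofList p.2
    d.insert p.1 ((PySem.List.pyRange 0 ((golds.length : Int)) 1).filter (fun j => !(s.contains j))))
    PySem.Dict.empty

theorem pvOthersItems (golds : List Int) :
    (pvOthers golds).items = (pvGroups golds).items.map (fun p => (p.1, pvComplL golds p.2)) := by
  unfold pvOthers
  have h := PySem.Dict.items_foldl_insert_fresh ((pvGroups golds).items)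
    (fun p : Int × List Int => p.1) (fun p => pvComplL golds p.2) PySem.Dict.empty
    (fun a _ => PySem.Dict.contains_empty a.1) (pvGroupsNodup golds)
  simpa [pvComplL] using h

theorem pvOthersGetD (golds : List Int) (v : Int) (hv : v ∈ golds) :
    (pvOthers golds).getD v [] = pvComplL golds (pvSame golds v) := by
  have hm : (v, pvComplL golds (pvSame golds v)) ∈ (pvOthers golds).items := by
    rw [pvOthersItems]
    exact List.mem_map_of_mem (pvGroupsMemItems golds v hv)
  have hnd : (pvOthers golds).keys.Nodup := by
    show ((pvOthers golds).items.map (fun p => p.1)).Nodup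
    rw [pvOthersItems, List.map_map]
    exact pvGroupsNodup golds
  exact PySem.Dict.getD_of_mem_items _ hm hnd []

theorem pvBeqComm (a b : Int) : (a == b) = (b == a) := by
  rw [Bool.eq_iff_iff, beq_iff_eq, beq_iff_eq]; exact eq_comm

theorem pvMemSame (golds : List Int) (v : Int) {r : Int × Int}
    (hr : r ∈ PySem.List.enumerate golds 0) : r.1 ∈ pvSame golds v ↔ r.2 = v := by
  unfold pvSame
  constructor
  · intro h
    obtain ⟨q, hq, hq1⟩ := List.mem_map.mp h
    obtain ⟨hqe, hqv⟩ := List.mem_filter.mp hq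
    have : q = r := pvFstInj golds hqe hr hq1
    subst this
    exact beq_iff_eq.mp hqv
  · intro h
    exact List.mem_map_of_mem (List.mem_filter.mpr ⟨hr, beq_iff_eq.mpr h⟩)

theorem pvValPEq (golds : List Int) (p : Int × Int) :
    (pvSame golds p.2).filter (fun j => j != p.1) = pvValP golds p := by
  unfold pvSame pvValP
  rw [List.filter_map, List.filter_filter]
  apply congrArg
  apply List.filter_congr
  intro r _
  simp only [Function.comp_apply, bne]
  rw [pvBeqComm r.1 p.1, pvBeqComm r.2 p.2]

theorem pvNodupSame (golds : List Int) (v : Int) : (pvSame golds v).Nodup := by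
  unfold pvSame
  exact (pvNodupFst golds).sublist ((@List.filter_sublist _ (fun r : Int × Int => r.2 == v) (PySem.List.enumerate golds 0)).map (fun x => x.1))

theorem pvLenSame (golds : List Int) {p : Int × Int}
    (hp : p ∈ PySem.List.enumerate golds 0) :
    (pvSame golds p.2).length = (pvValP golds p).length + 1 := by
  rw [List.length_eq_length_filter_add (fun j => j != p.1), pvValPEq golds p]
  have h1 : (pvSame golds p.2).filter (fun x => !(x != p.1)) = (pvSame golds p.2).filter (fun x => x == p.1) := by
    apply List.filter_congr; intro x _; simp [bne]
  rw [h1, List.filter_beq,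
    List.count_eq_one_of_mem (pvNodupSame golds p.2) ((pvMemSame golds p.2 hp).mpr rfl)]
  simp

theorem pvValNEq (golds : List Int) {p : Int × Int}
    (hp : p ∈ PySem.List.enumerate golds 0) :
    pvComplL golds (pvSame golds p.2) = pvValN golds p := by
  unfold pvComplL pvValN
  have hrange : PySem.List.pyRange 0 ((golds.length : Int)) 1
      = (PySem.List.enumerate golds 0).map (fun x => x.1) := by
    rw [PySem.List.map_fst_enumerate]; norm_num
  rw [hrange, List.filter_map]
  apply congrArg
  apply List.filter_congr
  intro r hr
  by_cases h2 : r.2 = p.2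
  · simp [Function.comp, List.contains_eq_mem, PySem.Set.mem_ofList,
      (pvMemSame golds p.2 hr).mpr h2, bne, h2]
  · have h1 : ¬ p.1 = r.1 := fun he => h2 (congrArg Prod.snd (pvFstInj golds hr hp he.symm))
    have hmem : ¬ r.1 ∈ pvSame golds p.2 := fun h => h2 ((pvMemSame golds p.2 hr).mp h)
    have h2' : ¬ p.2 = r.2 := fun he => h2 he.symm
    simp [Function.comp, List.contains_eq_mem, PySem.Set.mem_ofList, hmem, bne, h1, h2']

theorem pvMainA (golds : List Int) :
    get_pos_neg_from_gold golds
      = (((PySem.List.enumerate golds 0).foldl (pvCStep (pvValP golds)) PySem.Dict.empty).items,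
         ((PySem.List.enumerate golds 0).foldl (pvCStep (pvValN golds)) PySem.Dict.empty).items) := by
  have hsplit : ∀ (pn : PySem.Dict Int (List Int) × PySem.Dict Int (List Int)) (p : Int × Int),
      (PySem.List.enumerate golds 0).foldl (fun (q : PySem.Dict Int (List Int) × PySem.Dict Int (List Int)) r =>
        ((if p.1 == r.1 then q.1
          else if p.2 == r.2 then
            (if q.1.contains p.1 then q.1.insert p.1 (q.1.getD p.1 [] ++ [r.1])
             else q.1.insert p.1 [r.1])
          else q.1),
         (if p.1 == r.1 then q.2
          else if p.2 != r.2 then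
            (if q.2.contains p.1 then q.2.insert p.1 (q.2.getD p.1 [] ++ [r.1])
             else q.2.insert p.1 [r.1])
          else q.2))) pn
      = ((PySem.List.enumerate golds 0).foldl (pvStep (fun r => !(p.1 == r.1) && (p.2 == r.2)) p.1) pn.1,
         (PySem.List.enumerate golds 0).foldl (pvStep (fun r => !(p.1 == r.1) && (p.2 != r.2)) p.1) pn.2) := by
    intro pn p
    obtain ⟨a, b⟩ := pn
    refine (PySem.List.foldl_prod_mk
      (fun (d : PySem.Dict Int (List Int)) (r : Int × Int) =>
        if p.1 == r.1 then d
        else if p.2 == r.2 then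
          (if d.contains p.1 then d.insert p.1 (d.getD p.1 [] ++ [r.1]) else d.insert p.1 [r.1])
        else d)
      (fun (d : PySem.Dict Int (List Int)) (r : Int × Int) =>
        if p.1 == r.1 then d
        else if p.2 != r.2 then
          (if d.contains p.1 then d.insert p.1 (d.getD p.1 [] ++ [r.1]) else d.insert p.1 [r.1])
        else d)
      (PySem.List.enumerate golds 0) a b).trans ?_
    refine Prod.ext ?_ ?_
    · apply PySem.List.foldl_congr_mem
      intro acc r _
      by_cases hb1 : p.1 == r.1 <;> by_cases hb2 : p.2 == r.2 <;>
        simp [pvStep, hb1, hb2]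
    · apply PySem.List.foldl_congr_mem
      intro acc r _
      by_cases hb1 : p.1 == r.1 <;> by_cases hb2 : p.2 != r.2 <;>
        simp [pvStep, hb1, hb2]
  have houter : (PySem.List.enumerate golds 0).foldl
      (fun (pn : PySem.Dict Int (List Int) × PySem.Dict Int (List Int)) p =>
        (PySem.List.enumerate golds 0).foldl (fun (q : PySem.Dict Int (List Int) × PySem.Dict Int (List Int)) r =>
          ((if p.1 == r.1 then q.1
            else if p.2 == r.2 then
              (if q.1.contains p.1 then q.1.insert p.1 (q.1.getD p.1 [] ++ [r.1])
               else q.1.insert p.1 [r.1])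
            else q.1),
           (if p.1 == r.1 then q.2
            else if p.2 != r.2 then
              (if q.2.contains p.1 then q.2.insert p.1 (q.2.getD p.1 [] ++ [r.1])
               else q.2.insert p.1 [r.1])
            else q.2))) pn) (PySem.Dict.empty, PySem.Dict.empty)
      = ((PySem.List.enumerate golds 0).foldl (pvCStep (pvValP golds)) PySem.Dict.empty,
         (PySem.List.enumerate golds 0).foldl (pvCStep (pvValN golds)) PySem.Dict.empty) := by
    refine ((PySem.List.foldl_congr_mem (PySem.List.enumerate golds 0) _ _
      (PySem.Dict.empty, PySem.Dict.empty) (fun acc p _ => hsplit acc p)).trans ?_)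
    refine (PySem.List.foldl_prod_mk
      (fun (d : PySem.Dict Int (List Int)) (p : Int × Int) =>
        (PySem.List.enumerate golds 0).foldl (pvStep (fun r => !(p.1 == r.1) && (p.2 == r.2)) p.1) d)
      (fun (d : PySem.Dict Int (List Int)) (p : Int × Int) =>
        (PySem.List.enumerate golds 0).foldl (pvStep (fun r => !(p.1 == r.1) && (p.2 != r.2)) p.1) d)
      (PySem.List.enumerate golds 0) PySem.Dict.empty PySem.Dict.empty).trans ?_
    refine Prod.ext ?_ ?_
    · exact pvNested (PySem.List.enumerate golds 0) (fun p r => !(p.1 == r.1) && (p.2 == r.2))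
        (PySem.List.enumerate golds 0) PySem.Dict.empty
        (fun p _ => PySem.Dict.contains_empty p.1) (pvNodupFst golds)
    · exact pvNested (PySem.List.enumerate golds 0) (fun p r => !(p.1 == r.1) && (p.2 != r.2))
        (PySem.List.enumerate golds 0) PySem.Dict.empty
        (fun p _ => PySem.Dict.contains_empty p.1) (pvNodupFst golds)
  unfold get_pos_neg_from_gold
  simp only [houter]

theorem pvMainB (golds : List Int) :
    get_pos_neg_from_gold_alt golds
      = (((PySem.List.enumerate golds 0).foldl (pvCStep (pvValP golds)) PySem.Dict.empty).items,
         ((PySem.List.enumerate golds 0).foldl (pvCStep (pvValN golds)) PySem.Dict.empty).items) := by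
  have houter : (PySem.List.enumerate golds 0).foldl
      (fun (q : PySem.Dict Int (List Int) × PySem.Dict Int (List Int)) p =>
        ((if ((pvGroups golds).getD p.2 []).length > 1 then
            q.1.insert p.1 (((pvGroups golds).getD p.2 []).filter (fun j => j != p.1))
          else q.1),
         (if !((pvOthers golds).getD p.2 []).isEmpty then
            q.2.insert p.1 ((pvOthers golds).getD p.2 [])
          else q.2))) (PySem.Dict.empty, PySem.Dict.empty)
      = ((PySem.List.enumerate golds 0).foldl (pvCStep (pvValP golds)) PySem.Dict.empty,
         (PySem.List.enumerate golds 0).foldl (pvCStep (pvValN golds)) PySem.Dict.empty) := by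
    refine (PySem.List.foldl_prod_mk
      (fun (d : PySem.Dict Int (List Int)) (p : Int × Int) =>
        if ((pvGroups golds).getD p.2 []).length > 1 then
          d.insert p.1 (((pvGroups golds).getD p.2 []).filter (fun j => j != p.1))
        else d)
      (fun (d : PySem.Dict Int (List Int)) (p : Int × Int) =>
        if !((pvOthers golds).getD p.2 []).isEmpty then
          d.insert p.1 ((pvOthers golds).getD p.2 [])
        else d)
      (PySem.List.enumerate golds 0) PySem.Dict.empty PySem.Dict.empty).trans ?_
    refine Prod.ext ?_ ?_
    · apply PySem.List.foldl_congr_mem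
      intro acc p hp
      rw [pvGroupsGetD golds p.2, pvValPEq golds p, pvLenSame golds hp]
      by_cases he : pvValP golds p = []
      · simp [pvCStep, he]
      · have hl : 0 < (pvValP golds p).length := List.length_pos_iff.mpr he
        simp [pvCStep, he, show (pvValP golds p).length + 1 > 1 from by omega]
    · apply PySem.List.foldl_congr_mem
      intro acc p hp
      have hv : p.2 ∈ golds := by
        rw [PySem.List.mem_enumerate_iff] at hp
        obtain ⟨k, hk, rfl⟩ := hp
        exact List.getElem_mem _
      rw [pvOthersGetD golds p.2 hv, pvValNEq golds hp]
      by_cases he : pvValN golds p = []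
      · simp [pvCStep, he]
      · simp [pvCStep, he]
  exact congrArg
    (fun x : PySem.Dict Int (List Int) × PySem.Dict Int (List Int) => (x.1.items, x.2.items)) houter

-- ===== VERDICT (by name: the statement is the Claim_ definition above) =====
theorem get_pos_neg_from_gold_spec : Claim_equal_get_pos_neg_from_gold := by
  intro golds _
  unfold Spec_get_pos_neg_from_gold
  rw [pvMainA, pvMainB]
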